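-- pv_equiv track=rewrite | github.com/anyalink99/spectral-primes | experiments/wild_theories/ulam.py | ulam_xy
-- ===== SOURCE A (Python) =====
-- def ulam_xy(n: int) -> tuple[int, int]:
--     """
--     Coordinates of integer n >= 1 on the standard Ulam spiral (n=1 at origin).
--     Axes: right +x, up +y; first step goes to (1,0) for n=2.
--     """
--     if n <= 0:
--         raise ValueError("n must be positive")
--     if n == 1:
--         return 0, 0
--     x, y = 0, 0
--     step_len = 1
--     direction = 0  # 0=E, 1=N, 2=W, 3=S
--     m = 1
--     while m < n:
--         for _ in range(2):
--             dx, dy = [(1, 0), (0, 1), (-1, 0), (0, -1)][direction]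
--             for _ in range(step_len):
--                 m += 1
--                 x += dx
--                 y += dy
--                 if m == n:
--                     return x, y
--             direction = (direction + 1) % 4
--         step_len += 1
--     return x, y
-- ===== SOURCE B (Python) =====
-- def ulam_xy(n: int) -> tuple[int, int]:
--     """
--     Coordinates of integer n >= 1 on the standard Ulam spiral (n=1 at origin).
--     Closed-form: find the ring k containing n via an integer square root,
--     then place n on one of the ring's four sides arithmetically.
--     """
--     if n <= 0:
--         raise ValueError("n must be positive")
--     if n == 1:
--         return 0, 0
--     # integer square root of n-1 (largest r with r*r <= n-1)
--     r = 0
--     while (r + 1) * (r + 1) <= n - 1: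
--         r += 1
--     k = (r + 1) // 2              # ring index: (2k-1)^2 < n <= (2k+1)^2
--     t = n - (2 * k - 1) ** 2 - 1  # 0-based offset along the ring, 0 <= t < 8k
--     side, j = divmod(t, 2 * k)
--     if side == 0:
--         return k, -k + 1 + j      # east side, going up
--     if side == 1:
--         return k - 1 - j, k       # north side, going left
--     if side == 2:
--         return -k, k - 1 - j      # west side, going down
--     return -k + 1 + j, -k         # south side, going right
-- ===== Notes on version B (the rewrite author's own statement) =====
-- stated objective: faster
-- what changed: replaces the step-by-step spiral walk with a closed-form ring formula: an integer square root finds the ring k with (2k-1)^2 < n <= (2k+1)^2, and divmod of the offset by the side length 2k places n on one of the four sides arithmetically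
import Mathlib
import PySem

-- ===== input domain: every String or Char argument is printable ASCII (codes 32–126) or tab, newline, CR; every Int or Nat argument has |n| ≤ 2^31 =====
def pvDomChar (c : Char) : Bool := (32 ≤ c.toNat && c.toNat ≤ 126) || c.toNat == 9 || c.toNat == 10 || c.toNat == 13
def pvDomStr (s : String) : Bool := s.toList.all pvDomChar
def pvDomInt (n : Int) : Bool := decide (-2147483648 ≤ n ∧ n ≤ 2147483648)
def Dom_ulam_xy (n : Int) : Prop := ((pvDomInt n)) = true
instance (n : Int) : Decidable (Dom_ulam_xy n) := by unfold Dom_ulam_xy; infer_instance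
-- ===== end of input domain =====

-- B replaces A's O(n) step-by-step spiral walk by a closed-form ring formula
-- (integer square root + divmod by the side length); equivalence on n ≥ 1 (A raises on n ≤ 0).

-- ===== PORT A =====
-- [(1,0),(0,1),(-1,0),(0,-1)][direction]: exact for direction ∈ {0,1,2,3}, which
-- invariantly holds since direction is always reduced mod 4.
def pvDirVec (d : Int) : Int × Int :=
  if d = 0 then (1, 0) else if d = 1 then (0, 1) else if d = 2 then (-1, 0) else (0, -1)

-- inner 'for _ in range(step_len)' loop: m += 1; x += dx; y += dy; early return inr on m == n
def pvLegA (n : Int) : Nat → Int → Int → Int → Int → Int → (Int × Int × Int) ⊕ (Int × Int)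
  | 0, m, x, y, _, _ => Sum.inl (m, x, y)
  | cnt + 1, m, x, y, dx, dy =>
    if m + 1 = n then Sum.inr (x + dx, y + dy)
    else pvLegA n cnt (m + 1) (x + dx) (y + dy) dx dy

-- outer 'while m < n' loop with its two legs; fuel only makes the recursion structural,
-- n.toNat fuel is never exhausted since m strictly increases each iteration.
def pvLoopA (n : Int) : Nat → Int → Int → Int → Int → Int → Int × Int
  | 0, x, y, _, _, _ => (x, y)
  | fuel + 1, x, y, stepLen, dir, m =>
    if m < n then
      let (dx, dy) := pvDirVec dir
      match pvLegA n stepLen.toNat m x y dx dy with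
      | Sum.inr p => p
      | Sum.inl (m1, x1, y1) =>
        let dir1 := PySem.Int.mod (dir + 1) 4
        let (dx2, dy2) := pvDirVec dir1
        match pvLegA n stepLen.toNat m1 x1 y1 dx2 dy2 with
        | Sum.inr p => p
        | Sum.inl (m2, x2, y2) =>
          pvLoopA n fuel x2 y2 (stepLen + 1) (PySem.Int.mod (dir1 + 1) 4) m2
    else (x, y)

def ulam_xy (n : Int) : Int × Int :=
  if n ≤ 0 then (0, 0)           -- Python raises ValueError here; outside Pre_
  else if n = 1 then (0, 0)
  else pvLoopA n n.toNat 0 0 1 0 1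

-- ===== PORT B =====
-- 'while (r+1)*(r+1) <= n-1: r += 1' ; fuel a.toNat is never exhausted
def pvIsqrtLoop (a : Int) : Nat → Int → Int
  | 0, r => r
  | fuel + 1, r => if (r + 1) * (r + 1) ≤ a then pvIsqrtLoop a fuel (r + 1) else r

def ulam_xy_alt (n : Int) : Int × Int :=
  if n ≤ 0 then (0, 0)           -- Python raises ValueError here; outside Pre_
  else if n = 1 then (0, 0)
  else
    let r := pvIsqrtLoop (n - 1) (n - 1).toNat 0
    let k := PySem.Int.floordiv (r + 1) 2
    let t := n - (2 * k - 1) * (2 * k - 1) - 1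
    let side := PySem.Int.floordiv t (2 * k)
    let j := PySem.Int.mod t (2 * k)
    if side = 0 then (k, -k + 1 + j)
    else if side = 1 then (k - 1 - j, k)
    else if side = 2 then (-k, k - 1 - j)
    else (-k + 1 + j, -k)

-- ===== PRECONDITION & SPEC =====
-- Pre_ excludes exactly n ≤ 0, where the Python A raises ValueError.
def Pre_ulam_xy (n : Int) : Prop := 1 ≤ n
instance (n : Int) : Decidable (Pre_ulam_xy n) := by unfold Pre_ulam_xy; infer_instance
def pvWitness_ulam_xy : Int := 10

def Spec_ulam_xy (n : Int) (out : Int × Int) : Prop := out = ulam_xy_alt n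
instance (n : Int) (out : Int × Int) : Decidable (Spec_ulam_xy n out) := by unfold Spec_ulam_xy; infer_instance

-- ===== CLAIM (what is proved, stated in full; the proofs are below) =====
def Claim_equal_ulam_xy : Prop := ∀ (n : Int), Dom_ulam_xy n → Pre_ulam_xy n → Spec_ulam_xy n (ulam_xy n)

-- ===== LEMMAS AND PROOFS =====

-- the closed-form position of n on ring k, written without div/mod
def pvSpecPos (n k : Int) : Int × Int :=
  let t := n - (2 * k - 1) * (2 * k - 1) - 1
  if t < 2 * k then (k, -k + 1 + t)
  else if t < 4 * k then (k - 1 - (t - 2 * k), k)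
  else if t < 6 * k then (-k, k - 1 - (t - 4 * k))
  else (-k + 1 + (t - 6 * k), -k)

lemma pvIsqrtLoop_spec (a : Int) :
    ∀ (fuel : Nat) (r : Int), 0 ≤ r → r * r ≤ a → a ≤ r + fuel →
    (pvIsqrtLoop a fuel r) * (pvIsqrtLoop a fuel r) ≤ a ∧
    a < (pvIsqrtLoop a fuel r + 1) * (pvIsqrtLoop a fuel r + 1) ∧ 0 ≤ pvIsqrtLoop a fuel r := by
  intro fuel
  induction fuel with
  | zero =>
    intro r h0 h1 h2
    simp only [pvIsqrtLoop]
    have h2' : a ≤ r := by omega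
    refine ⟨h1, ?_, h0⟩
    nlinarith [mul_self_nonneg r]
  | succ f ih =>
    intro r h0 h1 h2
    simp only [pvIsqrtLoop]
    by_cases h : (r + 1) * (r + 1) ≤ a
    · simp only [h, if_true]
      exact ih (r + 1) (by omega) h (by push_cast; push_cast at h2; omega)
    · simp only [h, if_false]
      exact ⟨h1, by omega, h0⟩

lemma pvLegA_inr (n : Int) :
    ∀ (cnt : Nat) (m x y dx dy : Int), m < n → n ≤ m + cnt →
    pvLegA n cnt m x y dx dy = Sum.inr (x + (n - m) * dx, y + (n - m) * dy) := by
  intro cnt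
  induction cnt with
  | zero => intro m x y dx dy h1 h2; omega
  | succ c ih =>
    intro m x y dx dy h1 h2
    simp only [pvLegA]
    by_cases h : m + 1 = n
    · simp only [h, if_true]
      have : n - m = 1 := by omega
      rw [this]; ring_nf
    · simp only [h, if_false]
      rw [ih (m + 1) (x + dx) (y + dy) dx dy (by omega) (by push_cast at h2 ⊢; omega)]
      have h3 : n - m = (n - (m + 1)) + 1 := by ring
      congr 1
      rw [h3]; ring_nf
lemma pvLegA_inl (n : Int) :
    ∀ (cnt : Nat) (m x y dx dy : Int), m + cnt < n →
    pvLegA n cnt m x y dx dy = Sum.inl (m + cnt, x + cnt * dx, y + cnt * dy) := by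
  intro cnt
  induction cnt with
  | zero => intro m x y dx dy h; simp [pvLegA]
  | succ c ih =>
    intro m x y dx dy h
    simp only [pvLegA]
    have h' : ¬ (m + 1 = n) := by push_cast at h; omega
    simp only [h', if_false]
    rw [ih (m + 1) (x + dx) (y + dy) dx dy (by push_cast at h ⊢; omega)]
    push_cast
    refine congrArg _ ?_
    refine Prod.ext (by ring) (Prod.ext (by ring) (by ring))

-- B equals the closed form on the unique ring k of n
lemma ulam_xy_alt_eq_spec (n k : Int) (hn : 2 ≤ n) (hk : 1 ≤ k)
    (hlo : (2 * k - 1) * (2 * k - 1) < n) (hhi : n ≤ (2 * k + 1) * (2 * k + 1)) :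
    ulam_xy_alt n = pvSpecPos n k := by
  have hn0 : ¬ (n ≤ 0) := by omega
  have hn1 : ¬ (n = 1) := by omega
  simp only [ulam_xy_alt, hn0, hn1, if_false]
  -- characterize the isqrt loop result q
  have hfuel : (n - 1 : Int) ≤ 0 + ((n - 1).toNat : Int) := by omega
  obtain ⟨hq1, hq2, hq0⟩ := pvIsqrtLoop_spec (n - 1) (n - 1).toNat 0 le_rfl (by omega) hfuel
  set q := pvIsqrtLoop (n - 1) (n - 1).toNat 0 with hqdef
  -- q ∈ {2k-1, 2k}
  have hqlo : 2 * k - 1 ≤ q := by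
    by_contra h
    push_neg at h
    have h1 : q + 1 ≤ 2 * k - 1 := by omega
    have : (q + 1) * (q + 1) ≤ (2 * k - 1) * (2 * k - 1) :=
      mul_self_le_mul_self (by omega) h1
    omega
  have hqhi : q ≤ 2 * k := by
    by_contra h
    push_neg at h
    have h1 : 2 * k + 1 ≤ q := by omega
    have : (2 * k + 1) * (2 * k + 1) ≤ q * q := mul_self_le_mul_self (by omega) h1
    omega
  have hkq : PySem.Int.floordiv (q + 1) 2 = k := by
    rw [PySem.Int.floordiv_eq_ediv_of_pos (by omega)]
    omega
  rw [hkq]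
  -- now compute side and j
  have h2k : (0 : Int) < 2 * k := by omega
  set t := n - (2 * k - 1) * (2 * k - 1) - 1 with htdef
  have ht0 : 0 ≤ t := by omega
  have ht8 : t < 8 * k := by nlinarith
  rw [PySem.Int.floordiv_eq_ediv_of_pos h2k, PySem.Int.mod_eq_emod_of_pos h2k]
  have hr0 : 0 ≤ t % (2 * k) := Int.emod_nonneg t (by omega)
  have hr1 : t % (2 * k) < 2 * k := Int.emod_lt_of_pos t h2k
  set s := t / (2 * k) with hsdef
  have hdm : 2 * k * s + t % (2 * k) = t := Int.mul_ediv_add_emod t (2 * k)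
  have hs0 : 0 ≤ s := Int.ediv_nonneg ht0 (by omega)
  have hs4 : s < 4 := by nlinarith
  simp only [pvSpecPos, ← htdef]
  rcases (by omega : s = 0 ∨ s = 1 ∨ s = 2 ∨ s = 3) with h | h | h | h <;> rw [h] at hdm <;>
    simp only [h]
  · have h2 : t < 2 * k := by omega
    have h1 : t % (2 * k) = t := by omega
    norm_num [h2, h1]
  · have h2 : ¬ (t < 2 * k) := by omega
    have h3 : t < 4 * k := by omega
    have h1 : t % (2 * k) = t - 2 * k := by omega
    norm_num [h2, h3, h1]
  · have h2 : ¬ (t < 2 * k) := by omega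
    have h3 : ¬ (t < 4 * k) := by omega
    have h4 : t < 6 * k := by omega
    have h1 : t % (2 * k) = t - 4 * k := by omega
    norm_num [h2, h3, h4, h1]
  · have h2 : ¬ (t < 2 * k) := by omega
    have h3 : ¬ (t < 4 * k) := by omega
    have h4 : ¬ (t < 6 * k) := by omega
    have h1 : t % (2 * k) = t - 6 * k := by omega
    norm_num [h2, h3, h4, h1]

-- A's outer loop from the canonical entry state of iteration step_len = s
-- returns B's value; by induction on the fuel
set_option maxHeartbeats 1000000 in
lemma pvLoopA_inv (n : Int) (hn : 2 ≤ n) :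
    ∀ (fuel : Nat) (s x y d m : Int),
    m = s * s - s + 1 → m < n → n - m ≤ (fuel : Int) →
    ((∃ c, 0 ≤ c ∧ s = 2 * c + 1 ∧ d = 0 ∧ x = -c ∧ y = -c) ∨
     (∃ c, 1 ≤ c ∧ s = 2 * c ∧ d = 2 ∧ x = c ∧ y = c)) →
    pvLoopA n fuel x y s d m = ulam_xy_alt n := by
  intro fuel
  induction fuel with
  | zero => intro s x y d m hm hlt hf _; exfalso; simp at hf; omega
  | succ f ih =>
    intro s x y d m hm hlt hf hst
    have hs1 : 1 ≤ s := by rcases hst with ⟨c, hc, rfl, _⟩ | ⟨c, hc, rfl, _⟩ <;> omega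
    have hcast : ((s.toNat : Int)) = s := Int.toNat_of_nonneg (by omega)
    simp only [pvLoopA, hlt, if_true]
    rcases hst with ⟨c, hc, hs, hd, hx, hy⟩ | ⟨c, hc, hs, hd, hx, hy⟩
    · -- s = 2c+1, direction E then N, from (-c,-c), m = 4c²+2c+1
      have hmval : m = 4 * (c * c) + 2 * c + 1 := by rw [hm, hs]; ring
      have e1 : (2 * c - 1) * (2 * c - 1) = 4 * (c * c) - 4 * c + 1 := by ring
      have e2 : (2 * c + 1) * (2 * c + 1) = 4 * (c * c) + 4 * c + 1 := by ring
      have e3 : (2 * (c + 1) - 1) * (2 * (c + 1) - 1) = 4 * (c * c) + 4 * c + 1 := by ring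
      have e4 : (2 * (c + 1) + 1) * (2 * (c + 1) + 1) = 4 * (c * c) + 12 * c + 9 := by ring
      subst hd
      simp only [pvDirVec]
      norm_num
      rw [hx, hy]
      by_cases hleg1 : n ≤ m + s
      · -- returns within the east leg
        rw [pvLegA_inr n s.toNat m (-c) (-c) 1 0 hlt (by omega)]
        dsimp only
        simp only [mul_one, mul_zero, add_zero]
        by_cases hring : n ≤ (2 * c + 1) * (2 * c + 1)
        · -- still on ring c (end of its south side); c ≥ 1 here
          have hc1 : 1 ≤ c := by
            rcases (by omega : 1 ≤ c ∨ c = 0) with h | h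
            · exact h
            · exfalso; rw [h] at hring hmval; omega
          rw [ulam_xy_alt_eq_spec n c hn hc1 (by rw [e1]; linarith) hring]
          simp only [pvSpecPos]
          rw [e2] at hring
          have h1 : ¬ (n - (2 * c - 1) * (2 * c - 1) - 1 < 2 * c) := by
            simp only [e1, not_lt]; linarith
          have h2 : ¬ (n - (2 * c - 1) * (2 * c - 1) - 1 < 4 * c) := by
            simp only [e1, not_lt]; linarith
          have h3 : ¬ (n - (2 * c - 1) * (2 * c - 1) - 1 < 6 * c) := by
            simp only [e1, not_lt]; linarith
          simp only [h1, h2, h3, if_false]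
          refine Prod.ext ?_ ?_ <;> simp [e1] <;> linarith
        · -- first cell of ring c+1 (east side start)
          rw [e2] at hring
          rw [ulam_xy_alt_eq_spec n (c + 1) hn (by omega) (by rw [e3]; linarith)
            (by rw [e4]; linarith)]
          simp only [pvSpecPos]
          have h1 : n - (2 * (c + 1) - 1) * (2 * (c + 1) - 1) - 1 < 2 * (c + 1) := by
            rw [e3]; linarith
          simp only [h1, if_true]
          refine Prod.ext ?_ ?_ <;> simp [e3] <;> linarith
      · -- pass through the east leg, into the north leg
        rw [pvLegA_inl n s.toNat m (-c) (-c) 1 0 (by omega)]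
        dsimp only
        rw [hcast]
        by_cases hleg2 : n ≤ m + s + s
        · rw [pvLegA_inr n s.toNat (m + s) (-c + s * 1) (-c + s * 0) 0 1 (by omega) (by omega)]
          dsimp only
          simp only [mul_one, mul_zero, add_zero]
          rw [ulam_xy_alt_eq_spec n (c + 1) hn (by omega) (by rw [e3]; linarith)
            (by rw [e4]; linarith)]
          simp only [pvSpecPos]
          have h1 : n - (2 * (c + 1) - 1) * (2 * (c + 1) - 1) - 1 < 2 * (c + 1) := by
            rw [e3]; linarith
          simp only [h1, if_true]
          refine Prod.ext ?_ ?_ <;> simp [e3] <;> linarith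
        · rw [pvLegA_inl n s.toNat (m + s) (-c + s * 1) (-c + s * 0) 0 1 (by omega)]
          dsimp only
          rw [hcast]
          refine ih (s + 1) (-c + s * 1 + s * 0) (-c + s * 0 + s * 1) 2 (m + s + s)
            ?_ (by omega) (by push_cast at hf ⊢; omega) ?_
          · rw [hm, hs]; ring
          · exact Or.inr ⟨c + 1, by omega, by omega, rfl, by omega, by omega⟩
    · -- s = 2c, direction W then S, from (c,c), m = 4c²-2c+1
      have hmval : m = 4 * (c * c) - 2 * c + 1 := by rw [hm, hs]; ring
      have e1 : (2 * c - 1) * (2 * c - 1) = 4 * (c * c) - 4 * c + 1 := by ring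
      have e2 : (2 * c + 1) * (2 * c + 1) = 4 * (c * c) + 4 * c + 1 := by ring
      subst hd
      simp only [pvDirVec]
      norm_num
      rw [hx, hy]
      by_cases hleg1 : n ≤ m + s
      · -- returns within the west leg: ring c, north side
        rw [pvLegA_inr n s.toNat m c c (-1) 0 hlt (by omega)]
        dsimp only
        simp only [mul_zero, add_zero]
        rw [ulam_xy_alt_eq_spec n c hn hc (by rw [e1]; linarith) (by rw [e2]; linarith)]
        simp only [pvSpecPos]
        have h1 : ¬ (n - (2 * c - 1) * (2 * c - 1) - 1 < 2 * c) := by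
          simp only [e1, not_lt]; linarith
        have h2 : n - (2 * c - 1) * (2 * c - 1) - 1 < 4 * c := by rw [e1]; linarith
        simp only [h1, h2, if_false, if_true]
        refine Prod.ext ?_ ?_ <;> simp [e1] <;> linarith
      · -- pass through the west leg, into the south leg
        rw [pvLegA_inl n s.toNat m c c (-1) 0 (by omega)]
        dsimp only
        rw [hcast]
        by_cases hleg2 : n ≤ m + s + s
        · -- returns within the south leg: ring c, west side
          rw [pvLegA_inr n s.toNat (m + s) (c + s * -1) (c + s * 0) 0 (-1) (by omega) (by omega)]
          dsimp only
          simp only [mul_zero, add_zero]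
          rw [ulam_xy_alt_eq_spec n c hn hc (by rw [e1]; linarith) (by rw [e2]; linarith)]
          simp only [pvSpecPos]
          have h1 : ¬ (n - (2 * c - 1) * (2 * c - 1) - 1 < 2 * c) := by
            simp only [e1, not_lt]; linarith
          have h2 : ¬ (n - (2 * c - 1) * (2 * c - 1) - 1 < 4 * c) := by
            simp only [e1, not_lt]; linarith
          have h3 : n - (2 * c - 1) * (2 * c - 1) - 1 < 6 * c := by rw [e1]; linarith
          simp only [h1, h2, h3, if_false, if_true]
          refine Prod.ext ?_ ?_ <;> simp [e1] <;> linarith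
        · rw [pvLegA_inl n s.toNat (m + s) (c + s * -1) (c + s * 0) 0 (-1) (by omega)]
          dsimp only
          rw [hcast]
          refine ih (s + 1) (c + s * -1 + s * 0) (c + s * 0 + s * -1) 0 (m + s + s)
            ?_ (by omega) (by push_cast at hf ⊢; omega) ?_
          · rw [hm, hs]; ring
          · exact Or.inl ⟨c, by omega, by omega, rfl, by omega, by omega⟩

-- ===== VERDICT (by name: the statement is the Claim_ definition above) =====
theorem ulam_xy_spec : Claim_equal_ulam_xy := by
  intro n _ hpre
  unfold Spec_ulam_xy Pre_ulam_xy at *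
  by_cases hn1 : n = 1
  · subst hn1; decide
  · have hn : 2 ≤ n := by omega
    have h0 : ¬ (n ≤ 0) := by omega
    simp only [ulam_xy, h0, hn1, if_false]
    exact pvLoopA_inv n hn n.toNat 1 0 0 0 1 (by ring) (by omega) (by omega)
      (Or.inl ⟨0, le_rfl, by ring, rfl, by ring, by ring⟩)
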